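-- pv_equiv track=rewrite | github.com/elapuestojoe/Iprep | python/arrays/almostIncreasingSequence.py | checkSequenceIgnoringIndex
-- ===== SOURCE A (Python) =====
-- def checkSequenceIgnoringIndex(sequence, index):
--     i = 0
--     while(i < len(sequence)-1):
--         if(i == index):
--             i += 1
--         j = i + 1
--         if(j == index):
--             j += 1
--
--         if(j < len(sequence) and sequence[j] <= sequence[i]):
--             return False
--         i+=1
--     return True
-- ===== SOURCE B (Python) =====
-- def checkSequenceIgnoringIndex(sequence, index):
--     filtered = [x for pos, x in enumerate(sequence) if pos != index]
--     return all(a < b for a, b in zip(filtered, filtered[1:]))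
-- ===== Notes on version B (the rewrite author's own statement) =====
-- stated objective: simpler
-- what changed: B separates the two concerns: it first builds the list with the ignored position filtered out, then checks strict monotonicity of that list with one uniform adjacent-pairs pass, replacing A's interleaved index-skipping while loop with its two conditional index bumps.
import Mathlib
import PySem

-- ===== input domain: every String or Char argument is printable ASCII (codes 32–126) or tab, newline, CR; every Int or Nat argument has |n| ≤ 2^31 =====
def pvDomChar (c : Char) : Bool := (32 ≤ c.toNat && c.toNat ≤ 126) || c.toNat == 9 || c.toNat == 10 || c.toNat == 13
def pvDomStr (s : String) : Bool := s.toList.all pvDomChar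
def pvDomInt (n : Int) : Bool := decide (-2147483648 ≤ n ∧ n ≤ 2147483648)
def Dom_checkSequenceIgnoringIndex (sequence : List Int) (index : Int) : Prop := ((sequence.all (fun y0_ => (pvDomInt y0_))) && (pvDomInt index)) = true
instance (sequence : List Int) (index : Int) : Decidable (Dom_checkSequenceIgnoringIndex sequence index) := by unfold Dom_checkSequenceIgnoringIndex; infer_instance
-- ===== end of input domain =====

-- B replaces A's interleaved index-skipping while loop by two separate phases:
-- filter out the ignored position, then one uniform adjacent-pairs check; objective: simpler.

-- ===== PORT A =====
-- A's while loop; i is the loop counter (a nonnegative int throughout in Python);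
-- the two 'if (… == index)' bumps and the guarded comparison are transliterated step for step
def loopA (sequence : List Int) (index : Int) (i : Nat) : Bool :=
  if (i : Int) < (sequence.length : Int) - 1 then
    let i' := if (i : Int) = index then i + 1 else i                     -- if(i == index): i += 1
    let j' := if ((i' + 1 : Nat) : Int) = index then i' + 2 else i' + 1  -- j = i + 1; if(j == index): j += 1
    if (j' : Int) < (sequence.length : Int) ∧
        PySem.List.pyGetD sequence (j' : Int) 0 ≤ PySem.List.pyGetD sequence (i' : Int) 0 then
      false                                                              -- return False
    else loopA sequence index (i' + 1)                                   -- i += 1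
  else true
termination_by sequence.length - i
decreasing_by
  simp only [i'] at *
  split <;> omega

def checkSequenceIgnoringIndex (sequence : List Int) (index : Int) : Bool :=
  loopA sequence index 0

-- ===== PORT B =====
-- filtered = [x for pos, x in enumerate(sequence) if pos != index]
-- return all(a < b for a, b in zip(filtered, filtered[1:]))    (filtered[1:] is List.drop 1: exact for this slice)
def checkSequenceIgnoringIndex_alt (sequence : List Int) (index : Int) : Bool :=
  let filtered := ((PySem.List.enumerate sequence 0).filter (fun p => p.1 != index)).map Prod.snd
  (filtered.zip (filtered.drop 1)).all (fun p => p.1 < p.2)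

-- ===== PRECONDITION & SPEC =====
def Spec_checkSequenceIgnoringIndex (sequence : List Int) (index : Int) (out : Bool) : Prop := out = checkSequenceIgnoringIndex_alt sequence index
instance (sequence : List Int) (index : Int) (out : Bool) : Decidable (Spec_checkSequenceIgnoringIndex sequence index out) := by unfold Spec_checkSequenceIgnoringIndex; infer_instance

-- ===== CLAIM (what is proved, stated in full; the proofs are below) =====
def Claim_equal_checkSequenceIgnoringIndex : Prop := ∀ (sequence : List Int) (index : Int), Dom_checkSequenceIgnoringIndex sequence index → Spec_checkSequenceIgnoringIndex sequence index (checkSequenceIgnoringIndex sequence index)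

-- ===== LEMMAS AND PROOFS =====

def condA (l : List Int) (index : Int) (k : Nat) : Prop :=
  (k : Int) < (l.length : Int) - 1 →
    (∀ (a b : Nat),
      a = (if (k : Int) = index then k + 1 else k) →
      b = (if ((a + 1 : Nat) : Int) = index then a + 2 else a + 1) →
      ((b : Int) < (l.length : Int) → l.getD a 0 < l.getD b 0))

lemma pg (l : List Int) (m : Nat) :
    PySem.List.pyGetD l ((m : Nat) : Int) 0 = l.getD m 0 := by
  simp [List.getD]

lemma loopA_char (l : List Int) (index : Int) (i : Nat) :
    loopA l index i = true ↔ ∀ k, i ≤ k → condA l index k := by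
  have main : ∀ (d i : Nat), l.length ≤ i + d →
      (loopA l index i = true ↔ ∀ k, i ≤ k → condA l index k) := by
    intro d
    induction d with
    | zero =>
      intro i hi
      rw [loopA, if_neg (by omega)]
      simp only [true_iff]
      intro k hk hbad
      exfalso; omega
    | succ d ih =>
      intro i hi
      rw [loopA]
      by_cases hg : (i : Int) < (l.length : Int) - 1
      · rw [if_pos hg]
        by_cases hidx : (i : Int) = index
        · simp only [if_pos hidx]
          have hne : ¬ ((i + 1 + 1 : Nat) : Int) = index := by push_cast at hidx ⊢; omega
          simp only [if_neg hne]
          by_cases hfail : ((i + 1 + 1 : Nat) : Int) < (l.length : Int) ∧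
              PySem.List.pyGetD l ((i + 1 + 1 : Nat) : Int) 0 ≤ PySem.List.pyGetD l ((i + 1 : Nat) : Int) 0
          · rw [if_pos hfail]
            simp only [Bool.false_eq_true, false_iff, not_forall]
            refine ⟨i, le_refl i, ?_⟩
            intro hall
            have hc := hall hg (i + 1) (i + 1 + 1) (by rw [if_pos hidx]) (by rw [if_neg hne]) hfail.1
            have h2 := hfail.2
            rw [pg, pg] at h2
            omega
          · rw [if_neg hfail]
            rw [ih (i + 1 + 1) (by omega)]
            constructor
            · intro h k hk
              by_cases hk2 : i + 1 + 1 ≤ k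
              · exact h k hk2
              · -- k = i or k = i + 1; either way the checked pair is (i+1, i+2)
                intro hkg a b ha hb hblt
                have hai : a = i + 1 := by
                  rcases Nat.lt_or_ge k (i + 1) with hlt | hge
                  · have hki : k = i := by omega
                    rw [hki] at ha; rwa [if_pos hidx] at ha
                  · have hki : k = i + 1 := by omega
                    rw [hki] at ha
                    rw [if_neg (by push_cast at hidx ⊢; omega)] at ha; omega
                have hbi : b = i + 1 + 1 := by
                  rw [hai] at hb; rw [if_neg hne] at hb; omega
                rw [hai, hbi]
                rw [hbi] at hblt
                rw [pg, pg] at hfail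
                by_contra hle
                exact hfail ⟨hblt, by omega⟩
            · intro h k hk
              exact h k (by omega)
        · simp only [if_neg hidx]
          by_cases hj : ((i + 1 : Nat) : Int) = index
          · simp only [if_pos hj]
            by_cases hfail : ((i + 1 + 1 : Nat) : Int) < (l.length : Int) ∧
                PySem.List.pyGetD l ((i + 1 + 1 : Nat) : Int) 0 ≤ PySem.List.pyGetD l ((i : Nat) : Int) 0
            · rw [if_pos hfail]
              simp only [Bool.false_eq_true, false_iff, not_forall]
              refine ⟨i, le_refl i, ?_⟩
              intro hall
              have hc := hall hg i (i + 1 + 1) (by rw [if_neg hidx]) (by rw [if_pos hj]) hfail.1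
              have h2 := hfail.2
              rw [pg, pg] at h2
              omega
            · rw [if_neg hfail]
              rw [ih (i + 1) (by omega)]
              constructor
              · intro h k hk
                by_cases hk2 : i + 1 ≤ k
                · exact h k hk2
                · have hki : k = i := by omega
                  intro hkg a b ha hb hblt
                  rw [hki] at ha
                  have hai : a = i := by rwa [if_neg hidx] at ha
                  have hbi : b = i + 1 + 1 := by
                    rw [hai] at hb; rw [if_pos hj] at hb; omega
                  rw [hai, hbi]
                  rw [hbi] at hblt
                  rw [pg, pg] at hfail
                  by_contra hle
                  exact hfail ⟨hblt, by omega⟩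
              · intro h k hk
                exact h k (by omega)
          · simp only [if_neg hj]
            by_cases hfail : ((i + 1 : Nat) : Int) < (l.length : Int) ∧
                PySem.List.pyGetD l ((i + 1 : Nat) : Int) 0 ≤ PySem.List.pyGetD l ((i : Nat) : Int) 0
            · rw [if_pos hfail]
              simp only [Bool.false_eq_true, false_iff, not_forall]
              refine ⟨i, le_refl i, ?_⟩
              intro hall
              have hc := hall hg i (i + 1) (by rw [if_neg hidx]) (by rw [if_neg hj]) hfail.1
              have h2 := hfail.2
              rw [pg, pg] at h2
              omega
            · rw [if_neg hfail]
              rw [ih (i + 1) (by omega)]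
              constructor
              · intro h k hk
                by_cases hk2 : i + 1 ≤ k
                · exact h k hk2
                · have hki : k = i := by omega
                  intro hkg a b ha hb hblt
                  rw [hki] at ha
                  have hai : a = i := by rwa [if_neg hidx] at ha
                  have hbi : b = i + 1 := by rw [hai] at hb; rwa [if_neg hj] at hb
                  rw [hai, hbi]
                  rw [hbi] at hblt
                  rw [pg, pg] at hfail
                  by_contra hle
                  exact hfail ⟨hblt, by omega⟩
              · intro h k hk
                exact h k (by omega)
      · rw [if_neg hg]
        simp only [true_iff]
        intro k hk hbad
        exfalso; omega
  exact main l.length i (by omega)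

lemma zip_all_lt : ∀ (l : List Int),
    ((l.zip (l.drop 1)).all (fun p => p.1 < p.2) = true) ↔
      ∀ m, m + 1 < l.length → l.getD m 0 < l.getD (m + 1) 0
  | [] => by simp
  | [x] => by simp
  | x :: y :: t => by
    have ih := zip_all_lt (y :: t)
    simp only [List.drop_succ_cons, List.drop_zero, List.zip_cons_cons, List.all_cons,
      Bool.and_eq_true, decide_eq_true_eq, List.length_cons] at *
    constructor
    · rintro ⟨h1, h2⟩ m hm
      cases m with
      | zero => simpa using h1
      | succ m =>
        have := (ih.1 h2) m (by simpa using by omega)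
        simpa [List.getD_cons_succ] using this
    · intro h
      refine ⟨by simpa using h 0 (by omega), ih.2 ?_⟩
      intro m hm
      have := h (m + 1) (by omega)
      simpa [List.getD_cons_succ] using this

lemma filtered_eq (index : Int) (l : List Int) (s : Int) :
    ((PySem.List.enumerate l s).filter (fun p => p.1 != index)).map Prod.snd
      = if s ≤ index ∧ index < s + l.length then
          l.take (index - s).toNat ++ l.drop ((index - s).toNat + 1)
        else l := by
  induction l generalizing s with
  | nil =>
    simp only [PySem.List.enumerate_nil, List.filter_nil, List.map_nil, List.length_nil]
    split
    · omega
    · rfl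
  | cons x xs ih =>
    rw [PySem.List.enumerate_cons]
    by_cases hs : s = index
    · subst hs
      simp only [List.filter_cons, bne_self_eq_false, Bool.false_eq_true, if_false,
        ih (s + 1)]
      have h1 : ¬ (s + 1 ≤ s ∧ s < s + 1 + (xs.length : Int)) := by omega
      rw [if_neg h1]
      have h2 : (s ≤ s ∧ s < s + ((x :: xs).length : Int)) := by
        simp only [List.length_cons]; push_cast; omega
      rw [if_pos h2]
      simp
    · have hb : ((s, x).1 != index) = true := by simp [hs]
      simp only [List.filter_cons, hb, if_pos, List.map_cons, ih (s + 1)]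
      by_cases h3 : s + 1 ≤ index ∧ index < s + 1 + (xs.length : Int)
      · rw [if_pos h3]
        have h4 : s ≤ index ∧ index < s + ((x :: xs).length : Int) := by
          simp only [List.length_cons]; push_cast; omega
        rw [if_pos h4]
        have h5 : (index - s).toNat = (index - (s + 1)).toNat + 1 := by omega
        rw [h5]
        simp [List.take_succ_cons, List.drop_succ_cons]
      · rw [if_neg h3]
        have h4 : ¬ (s ≤ index ∧ index < s + ((x :: xs).length : Int)) := by
          simp only [List.length_cons]; push_cast; omega
        rw [if_neg h4]

lemma getD_take_drop_lt (l : List Int) (t m : Nat) (h : m < t) (ht : t ≤ l.length) :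
    (l.take t ++ l.drop (t + 1)).getD m 0 = l.getD m 0 := by
  rw [List.getD_eq_getElem?_getD, List.getD_eq_getElem?_getD,
    List.getElem?_append_left (by simp [List.length_take]; omega)]
  rw [List.getElem?_take_of_lt h]

lemma getD_take_drop_ge (l : List Int) (t m : Nat) (h : t ≤ m) (ht : t < l.length) :
    (l.take t ++ l.drop (t + 1)).getD m 0 = l.getD (m + 1) 0 := by
  rw [List.getD_eq_getElem?_getD, List.getD_eq_getElem?_getD,
    List.getElem?_append_right (by simp [List.length_take]; omega)]
  rw [List.getElem?_drop]
  have he : t + 1 + (m - (List.take t l).length) = m + 1 := by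
    rw [List.length_take]; omega
  rw [he]

lemma bridge_invalid (l : List Int) (index : Int)
    (h : index < 0 ∨ (l.length : Int) ≤ index) :
    (∀ k, 0 ≤ k → condA l index k) ↔
      (∀ m, m + 1 < l.length → l.getD m 0 < l.getD (m + 1) 0) := by
  constructor
  · intro H m hm
    exact H m (Nat.zero_le m) (by omega) m (m + 1)
      (by rw [if_neg (by rcases h with h | h <;> omega)])
      (by rw [if_neg (by rcases h with h | h <;> omega)])
      (by omega)
  · intro H k _ hkg a b ha hb hblt
    have ha' : a = k := by
      rw [if_neg (by rcases h with h | h <;> omega)] at ha; exact ha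
    have hb' : b = k + 1 := by
      rw [ha'] at hb
      rw [if_neg (by rcases h with h | h <;> omega)] at hb; exact hb
    rw [ha', hb']
    exact H k (by omega)

lemma bridge_valid (l : List Int) (index : Int) (h0 : 0 ≤ index)
    (h1 : index < (l.length : Int)) :
    (∀ k, 0 ≤ k → condA l index k) ↔
      (∀ m, m + 1 < (l.take index.toNat ++ l.drop (index.toNat + 1)).length →
        (l.take index.toNat ++ l.drop (index.toNat + 1)).getD m 0
          < (l.take index.toNat ++ l.drop (index.toNat + 1)).getD (m + 1) 0) := by
  have htI : (index.toNat : Int) = index := Int.toNat_of_nonneg h0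
  have ht : index.toNat < l.length := by omega
  have hlen : (l.take index.toNat ++ l.drop (index.toNat + 1)).length = l.length - 1 := by
    simp only [List.length_append, List.length_take, List.length_drop]
    omega
  constructor
  · intro H m hm
    rw [hlen] at hm
    by_cases hmt : m < index.toNat
    · rw [getD_take_drop_lt l index.toNat m hmt (le_of_lt ht)]
      by_cases hm1 : m + 1 = index.toNat
      · rw [getD_take_drop_ge l index.toNat (m + 1) (by omega) ht]
        have hc := H m (Nat.zero_le m) (by omega) m (m + 2)
          (by rw [if_neg (by omega)])
          (by rw [if_pos (by omega)])
          (by omega)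
        rw [show m + 1 + 1 = m + 2 from by omega]
        exact hc
      · rw [getD_take_drop_lt l index.toNat (m + 1) (by omega) (le_of_lt ht)]
        exact H m (Nat.zero_le m) (by omega) m (m + 1)
          (by rw [if_neg (by omega)])
          (by rw [if_neg (by omega)])
          (by omega)
    · rw [getD_take_drop_ge l index.toNat m (by omega) ht,
        getD_take_drop_ge l index.toNat (m + 1) (by omega) ht]
      have hc := H (m + 1) (Nat.zero_le _) (by omega) (m + 1) (m + 2)
        (by rw [if_neg (by omega)])
        (by rw [if_neg (by omega)])
        (by omega)
      rw [show m + 1 + 1 = m + 2 from by omega]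
      exact hc
  · intro H k _ hkg a b ha hb hblt
    by_cases hkt : k < index.toNat
    · have ha' : a = k := by rw [if_neg (by omega)] at ha; exact ha
      by_cases hk1 : k + 1 = index.toNat
      · have hb' : b = k + 2 := by
          rw [ha'] at hb; rw [if_pos (by omega)] at hb; exact hb
        rw [hb'] at hblt
        have hh := H k (by rw [hlen]; omega)
        rw [getD_take_drop_lt l index.toNat k hkt (le_of_lt ht),
          getD_take_drop_ge l index.toNat (k + 1) (by omega) ht] at hh
        rw [ha', hb', show k + 2 = k + 1 + 1 from by omega]
        exact hh
      · have hb' : b = k + 1 := by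
          rw [ha'] at hb; rw [if_neg (by omega)] at hb; exact hb
        have hh := H k (by rw [hlen]; omega)
        rw [getD_take_drop_lt l index.toNat k hkt (le_of_lt ht),
          getD_take_drop_lt l index.toNat (k + 1) (by omega) (le_of_lt ht)] at hh
        rw [ha', hb']
        exact hh
    · by_cases hkeq : k = index.toNat
      · have ha' : a = k + 1 := by rw [if_pos (by omega)] at ha; exact ha
        have hb' : b = k + 2 := by
          rw [ha'] at hb; rw [if_neg (by omega)] at hb; omega
        rw [hb'] at hblt
        have hh := H k (by rw [hlen]; omega)
        rw [getD_take_drop_ge l index.toNat k (by omega) ht,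
          getD_take_drop_ge l index.toNat (k + 1) (by omega) ht] at hh
        rw [ha', hb', show k + 2 = k + 1 + 1 from by omega]
        exact hh
      · have ha' : a = k := by rw [if_neg (by omega)] at ha; exact ha
        have hb' : b = k + 1 := by
          rw [ha'] at hb; rw [if_neg (by omega)] at hb; exact hb
        have hh := H (k - 1) (by rw [hlen]; omega)
        rw [getD_take_drop_ge l index.toNat (k - 1) (by omega) ht,
          getD_take_drop_ge l index.toNat (k - 1 + 1) (by omega) ht] at hh
        have e1 : k - 1 + 1 = k := by omega
        rw [e1] at hh
        rw [ha', hb']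
        exact hh

-- ===== VERDICT (by name: the statement is the Claim_ definition above) =====
theorem checkSequenceIgnoringIndex_spec : Claim_equal_checkSequenceIgnoringIndex := by
  intro sequence index _
  unfold Spec_checkSequenceIgnoringIndex checkSequenceIgnoringIndex checkSequenceIgnoringIndex_alt
  rw [Bool.eq_iff_iff, loopA_char]
  simp only [filtered_eq index sequence 0]
  by_cases hv : (0 : Int) ≤ index ∧ index < 0 + (sequence.length : Int)
  · rw [if_pos hv, zip_all_lt]
    rw [show index - 0 = index from by omega]
    exact bridge_valid sequence index hv.1 (by omega)
  · rw [if_neg hv, zip_all_lt]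
    exact bridge_invalid sequence index (by omega)
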